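-- pv_equiv track=rewrite | github.com/geekatron/jerry | scripts/transform_agents.py | tier
-- ===== SOURCE A (Python) =====
-- MCP_C7 = ("mcp__context7__",)
--
-- MCP_MK = ("mcp__memory-keeper__", "mcp__memory_keeper__")
--
-- def tier(at):
--     s = {str(t) for t in at}
--     if "Task" in s:
--         return "T5"
--     ext = any(t in ("WebSearch", "WebFetch") for t in s) or any(
--         any(str(t).startswith(p) for p in MCP_C7) for t in s
--     )
--     mem = any(any(str(t).startswith(p) for p in MCP_MK) for t in s)
--     if mem and ext:
--         return "T5"
--     if mem:
--         return "T4"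
--     if ext:
--         return "T3"
--     if any(t in ("Write", "Edit", "Bash") for t in s):
--         return "T2"
--     return "T1"
-- ===== SOURCE B (Python) =====
-- MCP_C7 = ("mcp__context7__",)
--
-- MCP_MK = ("mcp__memory-keeper__", "mcp__memory_keeper__")
--
-- def _rank(t):
--     # capability rank of one tool: 5=orchestration, 4=memory, 3=external, 2=editing, 1=read-only
--     s = str(t)
--     if s == "Task":
--         return 5
--     if s.startswith(MCP_MK):
--         return 4
--     if s in ("WebSearch", "WebFetch") or s.startswith(MCP_C7):
--         return 3
--     if s in ("Write", "Edit", "Bash"):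
--         return 2
--     return 1
--
-- def _join(a, b):
--     # join in the capability lattice: memory (4) and external (3) together give T5
--     if (a == 3 and b == 4) or (a == 4 and b == 3):
--         return 5
--     return max(a, b)
--
-- def tier(at):
--     r = 1
--     for t in at:
--         r = _join(r, _rank(t))
--     return "T%d" % r
-- ===== Notes on version B (the rewrite author's own statement) =====
-- stated objective: alternative
-- what changed: Replaces A's set construction, four any() scans and return cascade by mapping each tool to a numeric capability rank and folding an associative lattice join (where external=3 and memory=4 combine to 5) over the list, formatting the tier string from the final rank.
import Mathlib
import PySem

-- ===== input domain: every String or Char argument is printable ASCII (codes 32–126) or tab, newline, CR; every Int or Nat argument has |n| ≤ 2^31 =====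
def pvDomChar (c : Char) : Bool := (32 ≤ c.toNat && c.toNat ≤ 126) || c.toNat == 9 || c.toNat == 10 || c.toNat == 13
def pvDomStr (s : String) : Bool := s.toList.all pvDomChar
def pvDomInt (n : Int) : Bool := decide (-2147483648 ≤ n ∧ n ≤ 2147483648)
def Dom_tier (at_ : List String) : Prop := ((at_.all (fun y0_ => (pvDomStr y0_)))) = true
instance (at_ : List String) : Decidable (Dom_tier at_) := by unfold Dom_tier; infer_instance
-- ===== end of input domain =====

-- B replaces A's set construction, four any() scans and return cascade by mapping each tool to a capability rank and folding a lattice join over the list (alternative decomposition, same cost).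


-- ===== PORT A =====
-- s = {str(t) for t in at}; membership and any() over s (order never observed)
def tier (at_ : List String) : String :=
  let s : PySem.Set String := PySem.Set.ofList at_
  if PySem.Set.contains s "Task" then "T5"
  else
    let ext := (s.any (fun t => t == "WebSearch" || t == "WebFetch"))
      || (s.any (fun t => ["mcp__context7__"].any (fun p => PySem.Str.startswith t p)))
    let mem := s.any (fun t => ["mcp__memory-keeper__", "mcp__memory_keeper__"].any
      (fun p => PySem.Str.startswith t p))
    if mem && ext then "T5"
    else if mem then "T4"
    else if ext then "T3"
    else if s.any (fun t => t == "Write" || t == "Edit" || t == "Bash") then "T2"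
    else "T1"

-- ===== PORT B =====
-- _rank: capability rank of one tool (5 orchestration, 4 memory, 3 external, 2 editing, 1 read-only)
def pvRank (t : String) : Int :=
  if t == "Task" then 5
  else if PySem.Str.startswith t "mcp__memory-keeper__" || PySem.Str.startswith t "mcp__memory_keeper__" then 4
  else if (t == "WebSearch" || t == "WebFetch") || PySem.Str.startswith t "mcp__context7__" then 3
  else if t == "Write" || t == "Edit" || t == "Bash" then 2
  else 1

-- _join: join in the capability lattice; memory (4) and external (3) together give 5
def pvJoin (a b : Int) : Int :=
  if (a = 3 ∧ b = 4) ∨ (a = 4 ∧ b = 3) then 5 else max a b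

-- fold the join over the ranks, then "T%d" % r
def tier_alt (at_ : List String) : String :=
  "T" ++ PySem.Int.toStr (at_.foldl (fun r t => pvJoin r (pvRank t)) 1)

-- ===== PRECONDITION & SPEC =====
def Spec_tier (at_ : List String) (out : String) : Prop := out = tier_alt at_
instance (at_ : List String) (out : String) : Decidable (Spec_tier at_ out) := by unfold Spec_tier; infer_instance

-- ===== CLAIM (what is proved, stated in full; the proofs are below) =====
def Claim_equal_tier : Prop := ∀ (at_ : List String), Dom_tier at_ → Spec_tier at_ (tier at_)

-- ===== LEMMAS AND PROOFS =====

-- the four element predicates of A's scans, and the cascade rank of a list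
def pv5 (t : String) : Bool := t == "Task"
def pv4 (t : String) : Bool :=
  PySem.Str.startswith t "mcp__memory-keeper__" || PySem.Str.startswith t "mcp__memory_keeper__"
def pv3 (t : String) : Bool :=
  (t == "WebSearch" || t == "WebFetch") || PySem.Str.startswith t "mcp__context7__"
def pv2 (t : String) : Bool := t == "Write" || t == "Edit" || t == "Bash"

def pvR (xs : List String) : Int :=
  if xs.any pv5 then 5
  else if xs.any pv4 && xs.any pv3 then 5
  else if xs.any pv4 then 4
  else if xs.any pv3 then 3
  else if xs.any pv2 then 2
  else 1

-- a tool cannot be both external (pv3) and memory (pv4)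
theorem pvExcl34 (t : String) (h : pv3 t = true) : pv4 t = false := by
  unfold pv3 at h
  unfold pv4
  rcases Bool.or_eq_true_iff.mp h with h | h
  · rcases Bool.or_eq_true_iff.mp h with h | h <;>
      · rw [beq_iff_eq] at h; subst h; decide
  · rw [PySem.Str.startswith_eq, PySem.Chars.startswith_iff] at h
    simp only [PySem.Str.startswith_eq, Bool.or_eq_false_iff]
    constructor <;>
    · rw [← Bool.not_eq_true, PySem.Chars.startswith_iff]
      intro h2
      rcases List.prefix_or_prefix_of_prefix h h2 with hp | hp <;> revert hp <;> decide

theorem pvJoin_assoc (a b c : Int) :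
    pvJoin (pvJoin a b) c = pvJoin a (pvJoin b c) := by
  unfold pvJoin
  simp only [max_def]
  split_ifs <;> omega

theorem pvRank_bounds (t : String) : 1 ≤ pvRank t ∧ pvRank t ≤ 5 := by
  unfold pvRank; split_ifs <;> norm_num

theorem pvJoin_bounds (a b : Int) (ha : 1 ≤ a ∧ a ≤ 5) (hb : 1 ≤ b ∧ b ≤ 5) :
    1 ≤ pvJoin a b ∧ pvJoin a b ≤ 5 := by
  unfold pvJoin; simp only [max_def]; split_ifs <;> omega

theorem pvR_bounds (xs : List String) : 1 ≤ pvR xs ∧ pvR xs ≤ 5 := by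
  unfold pvR; split_ifs <;> norm_num

theorem pvJoin_one (a : Int) (ha : 1 ≤ a ∧ a ≤ 5) : pvJoin a 1 = a ∧ pvJoin 1 a = a := by
  unfold pvJoin; simp only [max_def]; split_ifs <;> omega

-- the cascade rank is the join of the head's rank with the tail's rank
theorem pvR_cons (x : String) (xs : List String) :
    pvR (x :: xs) = pvJoin (pvRank x) (pvR xs) := by
  have hrank : pvRank x =
      (if pv5 x then (5 : Int) else if pv4 x then 4 else if pv3 x then 3
       else if pv2 x then 2 else 1) := rfl
  rw [hrank]
  unfold pvR
  simp only [List.any_cons]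
  rcases Bool.eq_false_or_eq_true (pv5 x) with h5 | h5 <;>
  rcases Bool.eq_false_or_eq_true (pv4 x) with h4 | h4 <;>
  rcases Bool.eq_false_or_eq_true (pv3 x) with h3 | h3 <;>
  rcases Bool.eq_false_or_eq_true (pv2 x) with h2 | h2 <;>
  first
    | (have hx := pvExcl34 x h3; rw [h4] at hx; exact Bool.noConfusion hx)
    | (rcases Bool.eq_false_or_eq_true (xs.any pv5) with a5 | a5 <;>
       rcases Bool.eq_false_or_eq_true (xs.any pv4) with a4 | a4 <;>
       rcases Bool.eq_false_or_eq_true (xs.any pv3) with a3 | a3 <;>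
       rcases Bool.eq_false_or_eq_true (xs.any pv2) with a2 | a2 <;>
       simp only [h5, h4, h3, h2, a5, a4, a3, a2] <;> norm_num [pvJoin])

-- B's fold computes the cascade rank
theorem pvFold (xs : List String) : ∀ r : Int, 1 ≤ r ∧ r ≤ 5 →
    xs.foldl (fun r t => pvJoin r (pvRank t)) r = pvJoin r (pvR xs) := by
  induction xs with
  | nil => intro r hr; simp [pvR, (pvJoin_one r hr).1]
  | cons x xs ih =>
    intro r hr
    rw [List.foldl_cons, ih _ (pvJoin_bounds _ _ hr (pvRank_bounds x)),
      pvJoin_assoc, pvR_cons]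

-- any() over set(xs) equals any() over xs (same elements)
theorem pvSetAny (at_ : List String) (p : String → Bool) :
    (PySem.Set.ofList at_).any p = at_.any p := by
  rcases h : at_.any p with _ | _
  · simp only [List.any_eq_false] at h ⊢
    intro x hx
    exact h x ((PySem.Set.mem_ofList at_ x).mp hx)
  · simp only [List.any_eq_true] at h ⊢
    obtain ⟨x, hx, hp⟩ := h
    exact ⟨x, (PySem.Set.mem_ofList at_ x).mpr hx, hp⟩

-- membership in set(xs) equals an existence scan over xs
theorem pvSetContains (at_ : List String) (v : String) :
    PySem.Set.contains (PySem.Set.ofList at_) v = at_.any (fun t => t == v) := by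
  rcases h : at_.any (fun t => t == v) with _ | _
  · simp only [List.any_eq_false, beq_iff_eq] at h
    simp only [PySem.Set.contains, List.contains_eq_mem, decide_eq_false_iff_not]
    intro hv
    exact h v ((PySem.Set.mem_ofList at_ v).mp hv) rfl
  · simp only [List.any_eq_true, beq_iff_eq] at h
    obtain ⟨x, hx, rfl⟩ := h
    simp only [PySem.Set.contains, List.contains_eq_mem, decide_eq_true_eq]
    exact (PySem.Set.mem_ofList at_ x).mpr hx

-- one combined existence scan splits into two
theorem pvAnyOr (xs : List String) (p q : String → Bool) :
    xs.any (fun t => p t || q t) = (xs.any p || xs.any q) := by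
  induction xs with
  | nil => rfl
  | cons x xs ih =>
    rw [List.any_cons, List.any_cons, List.any_cons, ih]
    ac_rfl

-- A's cascade returns "T" followed by the cascade rank
theorem pvA (xs : List String) : tier xs = "T" ++ PySem.Int.toStr (pvR xs) := by
  have e5 : PySem.Set.contains (PySem.Set.ofList xs) "Task" = xs.any pv5 :=
    pvSetContains xs "Task"
  have eext : ((PySem.Set.ofList xs).any (fun t => t == "WebSearch" || t == "WebFetch") ||
      (PySem.Set.ofList xs).any (fun t => ["mcp__context7__"].any
        (fun p => PySem.Str.startswith t p))) = xs.any pv3 := by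
    rw [pvSetAny, pvSetAny, ← pvAnyOr]
    unfold pv3; simp
  have emem : ((PySem.Set.ofList xs).any (fun t => ["mcp__memory-keeper__",
      "mcp__memory_keeper__"].any (fun p => PySem.Str.startswith t p))) = xs.any pv4 := by
    rw [pvSetAny]; unfold pv4; simp
  have e2 : ((PySem.Set.ofList xs).any (fun t => t == "Write" || t == "Edit" || t == "Bash"))
      = xs.any pv2 := pvSetAny xs _
  simp only [tier, e5, eext, emem, e2]
  unfold pvR
  rcases Bool.eq_false_or_eq_true (xs.any pv5) with a5 | a5 <;>
  rcases Bool.eq_false_or_eq_true (xs.any pv4) with a4 | a4 <;>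
  rcases Bool.eq_false_or_eq_true (xs.any pv3) with a3 | a3 <;>
  rcases Bool.eq_false_or_eq_true (xs.any pv2) with a2 | a2 <;>
  simp only [a5, a4, a3, a2] <;> decide

-- ===== VERDICT (by name: the statement is the Claim_ definition above) =====
theorem tier_spec : Claim_equal_tier := by
  intro at_ _
  unfold Spec_tier tier_alt
  rw [pvFold at_ 1 (by norm_num), (pvJoin_one _ (pvR_bounds at_)).2, pvA]
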